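-- pv_equiv track=rewrite | github.com/yasaminaali/AI-in-3D-Printing | src/sa_generation_gpu.py | normalize_zone_grid
-- ===== SOURCE A (Python) =====
-- def normalize_zone_grid(zone_grid):
--     if not zone_grid:
--         return zone_grid
--     is_2d = isinstance(zone_grid[0], list)
--     if is_2d:
--         flat = [int(v) for row in zone_grid for v in row]
--     else:
--         flat = [int(v) for v in zone_grid]
--     unique = sorted(set(flat))
--     mapping = {old: new for new, old in enumerate(unique)}
--     if is_2d:
--         return [[mapping[int(v)] for v in row] for row in zone_grid]
--     return [mapping[int(v)] for v in flat]
-- ===== SOURCE B (Python) =====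
-- def normalize_zone_grid(zone_grid):
--     if not zone_grid:
--         return zone_grid
--     is_2d = isinstance(zone_grid[0], list)
--     if is_2d:
--         values = {int(v) for row in zone_grid for v in row}
--         return [[sum(1 for u in values if u < int(v)) for v in row] for row in zone_grid]
--     values = {int(v) for v in zone_grid}
--     return [sum(1 for u in values if u < int(v)) for v in zone_grid]
-- ===== Notes on version B (the rewrite author's own statement) =====
-- stated objective: alternative
-- what changed: B never sorts and builds no rank dict: the dense rank of each cell is computed directly as the count of distinct values strictly smaller than it, which equals the index in the sorted unique list.
import Mathlib
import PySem

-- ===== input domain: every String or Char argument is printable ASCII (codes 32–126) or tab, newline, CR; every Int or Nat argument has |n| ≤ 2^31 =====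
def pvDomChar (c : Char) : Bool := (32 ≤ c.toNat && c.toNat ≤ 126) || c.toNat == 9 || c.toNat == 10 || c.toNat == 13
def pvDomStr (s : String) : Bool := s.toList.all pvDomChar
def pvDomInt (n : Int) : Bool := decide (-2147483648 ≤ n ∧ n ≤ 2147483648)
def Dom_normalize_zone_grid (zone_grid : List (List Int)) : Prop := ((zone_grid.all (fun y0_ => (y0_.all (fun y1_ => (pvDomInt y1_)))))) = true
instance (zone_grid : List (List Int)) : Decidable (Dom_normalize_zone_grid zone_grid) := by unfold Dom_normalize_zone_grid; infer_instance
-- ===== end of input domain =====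

-- B drops A's sort+rank-dict entirely: each cell's dense rank is computed as the count of distinct values strictly below it (alternative algorithm, O(n*u) vs O(n log n); not claimed faster).


-- ===== PORT A =====
-- Under the List (List Int) type, zone_grid[0] is always a list, so 'is_2d' is True whenever
-- zone_grid is nonempty; the 1D branches of the Python are unreachable on this domain.
def normalize_zone_grid (zone_grid : List (List Int)) : List (List Int) :=
  if zone_grid = [] then zone_grid
  else
    let flat := zone_grid.flatMap (fun row => row.map (fun v => v))
    let unique := PySem.List.sorted (PySem.Set.ofList flat) (fun x => x)
    let mapping : PySem.Dict Int Int :=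
      (PySem.List.enumerate unique).foldl (fun d p => d.insert p.2 p.1) PySem.Dict.empty
    zone_grid.map (fun row => row.map (fun v => (mapping.get? v).getD 0))

-- ===== PORT B =====
-- B: same empty check; 'values' is the set of all cell values; each cell becomes
-- sum(1 for u in values if u < v) — counted by a fold over the set's distinct elements
-- (the sum is independent of the set's iteration order).
def normalize_zone_grid_alt (zone_grid : List (List Int)) : List (List Int) :=
  if zone_grid = [] then zone_grid
  else
    let values : PySem.Set Int := PySem.Set.ofList (zone_grid.flatMap (fun row => row.map (fun v => v)))
    zone_grid.map (fun row => row.map (fun v =>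
      values.foldl (fun acc u => if u < v then acc + 1 else acc) (0 : Int)))

-- ===== PRECONDITION & SPEC =====
def Spec_normalize_zone_grid (zone_grid : List (List Int)) (out : List (List Int)) : Prop := out = normalize_zone_grid_alt zone_grid
instance (zone_grid : List (List Int)) (out : List (List Int)) : Decidable (Spec_normalize_zone_grid zone_grid out) := by unfold Spec_normalize_zone_grid; infer_instance

-- ===== CLAIM =====
def Claim_equal_normalize_zone_grid : Prop := ∀ (zone_grid : List (List Int)), Dom_normalize_zone_grid zone_grid → Spec_normalize_zone_grid zone_grid (normalize_zone_grid zone_grid)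

-- ===== LEMMAS AND PROOFS =====
-- get? of the enumerate/insert fold: unchanged key keeps its value
theorem dict_fold_get?_not_mem (u : List Int) (s : Int) (d : PySem.Dict Int Int) (v : Int)
    (hv : v ∉ u) :
    ((PySem.List.enumerate u s).foldl (fun d p => d.insert p.2 p.1) d).get? v = d.get? v := by
  induction u generalizing s d with
  | nil => simp [PySem.List.enumerate_nil]
  | cons a t ih =>
    simp only [PySem.List.enumerate_cons, List.foldl_cons]
    rw [ih _ _ (fun h => hv (List.mem_cons_of_mem _ h)),
        PySem.Dict.get?_insert_of_ne _ _ (fun h => hv (by rw [h]; exact List.mem_cons_self))]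

-- get? of the enumerate/insert fold: for v in a nodup list u, the final value is s + idxOf v
theorem dict_fold_get?_mem (u : List Int) (s : Int) (d : PySem.Dict Int Int) (v : Int)
    (hv : v ∈ u) (hnd : u.Nodup) :
    ((PySem.List.enumerate u s).foldl (fun d p => d.insert p.2 p.1) d).get? v
      = some (s + (u.idxOf v : Int)) := by
  induction u generalizing s d with
  | nil => cases hv
  | cons a t ih =>
    simp only [PySem.List.enumerate_cons, List.foldl_cons]
    rcases List.mem_cons.mp hv with rfl | hvt
    · rw [dict_fold_get?_not_mem _ _ _ _ ((List.nodup_cons.mp hnd).1),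
          PySem.Dict.get?_insert_self]
      simp
    · have hne : v ≠ a := fun h => ((List.nodup_cons.mp hnd).1) (h ▸ hvt)
      rw [ih _ _ hvt (List.Nodup.of_cons hnd)]
      rw [List.idxOf_cons_ne _ (by simpa using hne.symm)]
      push_cast
      ring_nf

-- in a strictly increasing list, the index of a member is the number of elements below it
theorem idxOf_eq_countP_lt (u : List Int) (v : Int)
    (hs : u.Pairwise (· < ·)) (hv : v ∈ u) :
    (u.idxOf v : Int) = (u.countP (fun x => decide (x < v)) : Int) := by
  induction u with
  | nil => cases hv
  | cons a t ih =>
    rcases List.pairwise_cons.mp hs with ⟨ha, ht⟩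
    rcases List.mem_cons.mp hv with rfl | hvt
    · have hz : t.countP (fun x => decide (x < v)) = 0 :=
        List.countP_eq_zero.mpr (fun x hx => by simpa using not_lt_of_gt (ha x hx))
      simp [List.idxOf_cons_self, hz]
    · have hav : a < v := ha v hvt
      have hne : v ≠ a := fun h => lt_irrefl a (h ▸ hav)
      rw [List.idxOf_cons_ne _ (by simpa using hne.symm)]
      have := ih ht hvt
      simp only [List.countP_cons, decide_eq_true_eq]
      rw [if_pos hav]
      push_cast at this ⊢
      omega

theorem normalize_zone_grid_spec : Claim_equal_normalize_zone_grid := by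
  intro zone_grid _
  unfold Spec_normalize_zone_grid normalize_zone_grid normalize_zone_grid_alt
  by_cases hz : zone_grid = []
  · simp [hz]
  · simp only [if_neg hz]
    set flat := zone_grid.flatMap (fun row => row.map (fun v => v)) with hflat
    set values := PySem.Set.ofList flat with hvalues
    set unique := PySem.List.sorted values (fun x => x) with huniq
    apply List.map_congr_left
    intro row hrow
    apply List.map_congr_left
    intro v hv
    have hvf : v ∈ flat := by
      rw [hflat]; exact List.mem_flatMap.mpr ⟨row, hrow, by simpa using hv⟩
    have hvu : v ∈ unique := by
      rw [huniq, PySem.List.mem_sorted, hvalues]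
      exact (PySem.Set.mem_ofList _ _).mpr hvf
    have hs : unique.Pairwise (· < ·) := by
      rw [huniq, hvalues]; exact PySem.List.sorted_ofList_pairwise_lt flat
    have hperm : unique.Perm values := by
      rw [huniq]; exact PySem.List.sorted_perm _ _ _
    rw [dict_fold_get?_mem unique 0 PySem.Dict.empty v hvu hs.nodup]
    rw [PySem.List.foldl_ite_add_one]
    simp only [Option.getD_some, zero_add]
    rw [idxOf_eq_countP_lt unique v hs hvu, hperm.countP_eq]
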